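-- pv_equiv track=rewrite | github.com/Laura2480/Spectra | DeepTald_back_end/source/scale_items.py | count_trigram_repetitions
-- ===== SOURCE A (Python) =====
-- def count_trigram_repetitions(sentence):
--     # Normalize the sentence by converting it to lowercase
--     sentence = sentence.lower()
--
--     # Dictionary to store the count of each trigram
--     trigram_counts = {}
--
--     # Iterate through the sentence and extract trigrams
--     for i in range(len(sentence) - 2):
--         # Extract a group of 3 letters (trigram)
--         trigram = sentence[i:i+3]
--
--         # Ignore non-alphabetic trigrams (e.g., "a b", "1ab")
--         if not trigram.isalpha():
--             continue
--
--         # Count the trigram in the dictionary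
--         if trigram in trigram_counts:
--             trigram_counts[trigram] += 1
--         else:
--             trigram_counts[trigram] = 1
--     frequent_trigrams = {trigram: count for trigram, count in trigram_counts.items() if count > 2}
--     if not frequent_trigrams: frequent_trigrams = {'': 0}
--     return frequent_trigrams
-- ===== SOURCE B (Python) =====
-- def count_trigram_repetitions(sentence):
--     s = sentence.lower()
--     grams = [s[i:i+3] for i in range(len(s) - 2) if s[i:i+3].isalpha()]
--     # Count by sorting: in the sorted list equal trigrams are adjacent, so a
--     # single run-length sweep yields each trigram's total count.
--     counts = {}
--     run, n = None, 0
--     for g in sorted(grams):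
--         if g == run:
--             n += 1
--         else:
--             if run is not None:
--                 counts[run] = n
--             run, n = g, 1
--     if run is not None:
--         counts[run] = n
--     # Emit the frequent trigrams in first-occurrence order over the sentence.
--     seen = set()
--     result = {}
--     for g in grams:
--         if g not in seen:
--             seen.add(g)
--             c = counts.get(g, 0)
--             if c > 2:
--                 result[g] = c
--     return result if result else {'': 0}
-- ===== Notes on version B (the rewrite author's own statement) =====
-- stated objective: alternative
-- what changed: A counts trigrams incrementally in a dict while scanning; B counts by sorting the flat list of alphabetic 3-char windows and run-length-sweeping consecutive equal runs, then emits the count>2 trigrams in first-occurrence order with a seen-set pass.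
import Mathlib
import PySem

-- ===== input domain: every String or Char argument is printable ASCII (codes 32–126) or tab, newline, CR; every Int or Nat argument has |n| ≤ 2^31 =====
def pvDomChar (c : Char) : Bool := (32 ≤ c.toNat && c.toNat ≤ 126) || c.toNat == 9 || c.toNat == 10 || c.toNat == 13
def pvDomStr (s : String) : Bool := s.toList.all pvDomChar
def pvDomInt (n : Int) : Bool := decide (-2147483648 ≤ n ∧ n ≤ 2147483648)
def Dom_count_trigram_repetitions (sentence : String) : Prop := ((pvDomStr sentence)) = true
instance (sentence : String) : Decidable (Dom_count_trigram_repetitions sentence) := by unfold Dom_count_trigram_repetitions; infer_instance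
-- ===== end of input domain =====

-- B replaces A's incremental counting dict with sort-based counting: sort the flat list of
-- alphabetic trigram windows, run-length-sweep the consecutive equal runs, then emit the
-- count>2 trigrams in first-occurrence order (alternative decomposition, not claimed faster).

-- ===== PORT A =====
def count_trigram_repetitions (sentence : String) : List (String × Int) :=
  let s := PySem.Str.lower sentence
  let trigram_counts :=
    (PySem.List.pyRange 0 (PySem.Str.len s - 2) 1).foldl
      (fun d i =>
        let trigram := PySem.Str.slice s (some i) (some (i + 3))
        if PySem.Str.strIsalpha trigram then
          (if d.contains trigram then d.modify trigram 0 (· + 1) else d.insert trigram 1)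
        else d)
      PySem.Dict.empty
  let frequent_trigrams :=
    trigram_counts.items.foldl
      (fun d p => if p.2 > 2 then d.insert p.1 p.2 else d) PySem.Dict.empty
  if frequent_trigrams.items.isEmpty then [("", 0)] else frequent_trigrams.items

-- ===== PORT B =====
-- the body of B's run-length loop: same trigram extends the run, otherwise flush the run
def rleStep (p : PySem.Dict String Int × Option String × Int) (g : String) :
    PySem.Dict String Int × Option String × Int :=
  if p.2.1 == some g then (p.1, p.2.1, p.2.2 + 1)
  else match p.2.1 with
       | some r => (p.1.insert r p.2.2, some g, 1)
       | none => (p.1, some g, 1)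

-- the trailing 'if run is not None: counts[run] = n' after the loop
def rleFinish (p : PySem.Dict String Int × Option String × Int) : PySem.Dict String Int :=
  match p.2.1 with
  | some r => p.1.insert r p.2.2
  | none => p.1

def count_trigram_repetitions_alt (sentence : String) : List (String × Int) :=
  let s := PySem.Str.lower sentence
  let grams :=
    ((PySem.List.pyRange 0 (PySem.Str.len s - 2) 1).map
      (fun i => PySem.Str.slice s (some i) (some (i + 3)))).filter
      (fun g => PySem.Str.strIsalpha g)
  let counts :=
    rleFinish ((PySem.List.sorted grams (fun g => g) false).foldl rleStep
      (PySem.Dict.empty, none, 0))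
  let res :=
    grams.foldl
      (fun (p : PySem.Set String × PySem.Dict String Int) g =>
        if PySem.Set.contains p.1 g then p
        else
          let c := counts.getD g 0
          (PySem.Set.add p.1 g, if c > 2 then p.2.insert g c else p.2))
      (PySem.Set.empty, PySem.Dict.empty)
  if res.2.items.isEmpty then [("", 0)] else res.2.items

-- ===== PRECONDITION & SPEC =====
def Spec_count_trigram_repetitions (sentence : String) (out : List (String × Int)) : Prop := out = count_trigram_repetitions_alt sentence
instance (sentence : String) (out : List (String × Int)) : Decidable (Spec_count_trigram_repetitions sentence out) := by unfold Spec_count_trigram_repetitions; infer_instance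

-- ===== CLAIM (what is proved, stated in full; the proofs are below) =====
def Claim_equal_count_trigram_repetitions : Prop := ∀ (sentence : String), Dom_count_trigram_repetitions sentence → Spec_count_trigram_repetitions sentence (count_trigram_repetitions sentence)

-- ===== LEMMAS AND PROOFS =====

-- Fuse a guarded fold over a list into a fold over the filtered image of the list.
theorem foldl_guard_fuse {α β γ : Type} (f : α → β) (p : β → Bool) (step : γ → β → γ)
    (xs : List α) (d : γ) :
    xs.foldl (fun d i => if p (f i) then step d (f i) else d) d
      = ((xs.map f).filter p).foldl step d := by
  induction xs generalizing d with
  | nil => rfl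
  | cons x xs ih =>
    by_cases h : p (f x) = true <;> simp [h, ih]

-- A's in-place counting step is exactly Counter's step.
theorem count_step_eq_modify (d : PySem.Dict String Int) (g : String) :
    (if d.contains g then d.modify g 0 (· + 1) else d.insert g 1)
      = d.modify g 0 (· + 1) := by
  by_cases h : d.contains g = true
  · simp [h]
  · simp only [Bool.not_eq_true] at h
    simp [h, PySem.Dict.insert, PySem.Dict.modify,
      PySem.Dict.getD_of_not_contains _ _ h]

-- Run-length sweep of a sorted tail: the final dict maps the current run to n + its
-- remaining occurrences, any later trigram to its count, and everything else to d.
theorem rle_run (ys : List String) (d : PySem.Dict String Int) (r : String) (n : Int)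
    (hp : ys.Pairwise (· ≤ ·)) (hr : ∀ y ∈ ys, r ≤ y) (g : String) :
    (rleFinish (ys.foldl rleStep (d, some r, n))).getD g 0
      = if g = r then n + (ys.count r : Int)
        else if g ∈ ys then (ys.count g : Int)
        else d.getD g 0 := by
  induction ys generalizing d r n with
  | nil =>
    simp [rleFinish, PySem.Dict.getD_insert]
  | cons y t ih =>
    have hpt : t.Pairwise (· ≤ ·) := hp.tail
    have hyt : ∀ z ∈ t, y ≤ z := fun z hz => (List.pairwise_cons.mp hp).1 z hz
    by_cases hy : y = r
    · subst hy
      have hstep : rleStep (d, some y, n) y = (d, some y, n + 1) := by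
        simp [rleStep]
      rw [List.foldl_cons, hstep, ih d y (n + 1) hpt hyt]
      by_cases hg : g = y
      · subst hg; simp [List.count_cons_self]; ring
      · simp only [hg, if_false, List.mem_cons, List.count_cons, beq_iff_eq, if_false]
        simp [Ne.symm hg]
    · have hry : r < y := lt_of_le_of_ne (hr y (by simp)) (Ne.symm hy)
      have hrt : r ∉ t := fun h => absurd (hyt r h) (not_le.mpr hry)
      have hry' : r ≠ y := ne_of_lt hry
      have hstep : rleStep (d, some r, n) y = (d.insert r n, some y, 1) := by
        simp [rleStep, hry']
      rw [List.foldl_cons, hstep, ih (d.insert r n) y 1 hpt hyt]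
      by_cases hg : g = r
      · subst hg
        simp [hry', hrt, Ne.symm hry', List.count_eq_zero_of_not_mem hrt]
      · by_cases hgy : g = y
        · subst hgy
          simp [hg, List.count_cons_self]; ring
        · by_cases hgt : g ∈ t
          · simp [hg, hgy, hgt, Ne.symm hgy]
          · simp [hg, hgy, hgt, PySem.Dict.getD_insert]

-- B's run-length pass over sorted(L) computes every trigram's count in L.
theorem counts_getD (L : List String) (g : String) :
    (rleFinish ((PySem.List.sorted L (fun x => x) false).foldl rleStep
        (PySem.Dict.empty, none, 0))).getD g 0 = (L.count g : Int) := by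
  have hperm : (PySem.List.sorted L (fun x => x) false).Perm L := PySem.List.sorted_perm L _ _
  have hpair : (PySem.List.sorted L (fun x => x) false).Pairwise (· ≤ ·) :=
    PySem.List.sorted_pairwise L _
  rw [← hperm.count_eq]
  cases hS : PySem.List.sorted L (fun x => x) false with
  | nil => simp [rleFinish, PySem.Dict.getD_empty]
  | cons y t =>
    rw [hS] at hpair
    have hstep : rleStep (PySem.Dict.empty, none, 0) y = (PySem.Dict.empty, some y, 1) := by
      simp [rleStep]
    rw [List.foldl_cons, hstep,
      rle_run t PySem.Dict.empty y 1 hpair.tail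
        (fun z hz => (List.pairwise_cons.mp hpair).1 z hz) g]
    by_cases hg : g = y
    · subst hg; simp [List.count_cons_self]; ring
    · by_cases hgt : g ∈ t
      · simp [hg, hgt, Ne.symm hg]
      · simp [hg, hgt, PySem.Dict.getD_empty, Ne.symm hg,
          List.count_eq_zero_of_not_mem hgt]

-- The still-unseen first occurrences of xs, relative to an already-seen set s.
def dedupFrom (s : PySem.Set String) : List String → List String
  | [] => []
  | g :: t => if PySem.Set.contains s g then dedupFrom s t
              else g :: dedupFrom (PySem.Set.add s g) t

-- B's seen-set pass is a plain fold over the unseen first occurrences.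
theorem seen_fold (f : PySem.Dict String Int → String → PySem.Dict String Int)
    (xs : List String) (s : PySem.Set String) (d : PySem.Dict String Int) :
    (xs.foldl
      (fun (p : PySem.Set String × PySem.Dict String Int) g =>
        if PySem.Set.contains p.1 g then p else (PySem.Set.add p.1 g, f p.2 g))
      (s, d)).2
    = (dedupFrom s xs).foldl f d := by
  induction xs generalizing s d with
  | nil => rfl
  | cons g t ih =>
    rw [List.foldl_cons]
    show (t.foldl _ (if PySem.Set.contains s g then (s, d)
        else (PySem.Set.add s g, f d g))).2 = _
    by_cases h : PySem.Set.contains s g = true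
    · rw [if_pos h]
      show _ = (dedupFrom s (g :: t)).foldl f d
      rw [show dedupFrom s (g :: t) = dedupFrom s t by
        simp only [dedupFrom]; rw [if_pos h]]
      exact ih s d
    · rw [if_neg h]
      show _ = (dedupFrom s (g :: t)).foldl f d
      rw [show dedupFrom s (g :: t) = g :: dedupFrom (PySem.Set.add s g) t by
        simp only [dedupFrom]; rw [if_neg h]]
      exact ih (PySem.Set.add s g) (f d g)

theorem append_dedupFrom (xs : List String) (s : PySem.Set String) :
    s ++ dedupFrom s xs = xs.foldl PySem.Set.add s := by
  induction xs generalizing s with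
  | nil => simp [dedupFrom]
  | cons g t ih =>
    rw [List.foldl_cons]
    by_cases h : PySem.Set.contains s g = true
    · have hmem : g ∈ s := by simpa using h
      have hadd : PySem.Set.add s g = s := PySem.Set.add_of_mem hmem
      rw [show dedupFrom s (g :: t) = dedupFrom s t by
        simp only [dedupFrom]; rw [if_pos h], hadd]
      exact ih s
    · have hmem : g ∉ s := by simpa using h
      have hadd : PySem.Set.add s g = s ++ [g] := PySem.Set.add_of_not_mem hmem
      rw [show dedupFrom s (g :: t) = g :: dedupFrom (PySem.Set.add s g) t by
        simp only [dedupFrom]; rw [if_neg h], hadd, ← ih (s ++ [g]), ← hadd]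
      simp [hadd]

theorem dedupFrom_empty (xs : List String) :
    dedupFrom PySem.Set.empty xs = PySem.List.dedup xs := by
  have h := append_dedupFrom xs PySem.Set.empty
  simpa [PySem.Set.empty, PySem.List.dedup_eq_ofList, PySem.Set.ofList_eq_foldl] using h

-- Both programs, specialised to the lowered string `s`, return the same list.
theorem core_eq (s' : String) :
    (let trigram_counts :=
      (PySem.List.pyRange 0 (PySem.Str.len s' - 2) 1).foldl
        (fun d i =>
          let trigram := PySem.Str.slice s' (some i) (some (i + 3))
          if PySem.Str.strIsalpha trigram then
            (if d.contains trigram then d.modify trigram 0 (· + 1) else d.insert trigram 1)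
          else d)
        PySem.Dict.empty
     let frequent_trigrams :=
      trigram_counts.items.foldl
        (fun d p => if p.2 > 2 then d.insert p.1 p.2 else d) PySem.Dict.empty
     if frequent_trigrams.items.isEmpty then [("", 0)] else frequent_trigrams.items)
    =
    (let grams :=
      ((PySem.List.pyRange 0 (PySem.Str.len s' - 2) 1).map
        (fun i => PySem.Str.slice s' (some i) (some (i + 3)))).filter
        (fun g => PySem.Str.strIsalpha g)
     let counts :=
      rleFinish ((PySem.List.sorted grams (fun g => g) false).foldl rleStep
        (PySem.Dict.empty, none, 0))
     let res :=
      grams.foldl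
        (fun (p : PySem.Set String × PySem.Dict String Int) g =>
          if PySem.Set.contains p.1 g then p
          else
            let c := counts.getD g 0
            (PySem.Set.add p.1 g, if c > 2 then p.2.insert g c else p.2))
        (PySem.Set.empty, PySem.Dict.empty)
     if res.2.items.isEmpty then [("", 0)] else res.2.items) := by
  set L := ((PySem.List.pyRange 0 (PySem.Str.len s' - 2) 1).map
      (fun i => PySem.Str.slice s' (some i) (some (i + 3)))).filter
      (fun g => PySem.Str.strIsalpha g) with hL
  -- A's counting loop is Counter(L)
  have hA : (PySem.List.pyRange 0 (PySem.Str.len s' - 2) 1).foldl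
      (fun d i =>
        let trigram := PySem.Str.slice s' (some i) (some (i + 3))
        if PySem.Str.strIsalpha trigram then
          (if d.contains trigram then d.modify trigram 0 (· + 1) else d.insert trigram 1)
        else d)
      PySem.Dict.empty = PySem.Dict.counter L := by
    have h1 : (fun (d : PySem.Dict String Int) i =>
        let trigram := PySem.Str.slice s' (some i) (some (i + 3))
        if PySem.Str.strIsalpha trigram then
          (if d.contains trigram then d.modify trigram 0 (· + 1) else d.insert trigram 1)
        else d)
      = (fun (d : PySem.Dict String Int) i =>
        if PySem.Str.strIsalpha (PySem.Str.slice s' (some i) (some (i + 3))) then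
          d.modify (PySem.Str.slice s' (some i) (some (i + 3))) 0 (· + 1) else d) := by
      funext d i; simp only [count_step_eq_modify]
    rw [h1]
    exact foldl_guard_fuse (fun i => PySem.Str.slice s' (some i) (some (i + 3)))
        (fun g => PySem.Str.strIsalpha g)
        (fun (d : PySem.Dict String Int) g => d.modify g 0 (· + 1))
        (PySem.List.pyRange 0 (PySem.Str.len s' - 2) 1) PySem.Dict.empty
  -- A's frequent-trigram fold over Counter(L).items is a fold over dedup L
  have hAfreq : (PySem.Dict.counter L).items.foldl
      (fun d p => if p.2 > 2 then d.insert p.1 p.2 else d) PySem.Dict.empty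
      = (PySem.List.dedup L).foldl
        (fun d g => if (L.count g : Int) > 2 then d.insert g (L.count g : Int) else d)
        PySem.Dict.empty := by
    rw [PySem.Dict.items_counter, List.foldl_map]
    rfl
  -- B's seen-set pass is the same fold over dedup L
  have hB : (L.foldl
      (fun (p : PySem.Set String × PySem.Dict String Int) g =>
        if PySem.Set.contains p.1 g then p
        else
          let c := (rleFinish ((PySem.List.sorted L (fun g => g) false).foldl rleStep
            (PySem.Dict.empty, none, 0))).getD g 0
          (PySem.Set.add p.1 g, if c > 2 then p.2.insert g c else p.2))
      (PySem.Set.empty, PySem.Dict.empty)).2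
      = (PySem.List.dedup L).foldl
        (fun d g => if (L.count g : Int) > 2 then d.insert g (L.count g : Int) else d)
        PySem.Dict.empty := by
    rw [seen_fold
      (fun d g =>
        let c := (rleFinish ((PySem.List.sorted L (fun g => g) false).foldl rleStep
          (PySem.Dict.empty, none, 0))).getD g 0
        if c > 2 then d.insert g c else d)
      L PySem.Set.empty PySem.Dict.empty, dedupFrom_empty]
    congr 1
    funext d g
    simp only [counts_getD L g]
  simp only [hA, hAfreq, ← hB]

-- ===== VERDICT (by name: the statement is the Claim_ definition above) =====
theorem count_trigram_repetitions_spec : Claim_equal_count_trigram_repetitions := by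
  intro sentence _
  unfold Spec_count_trigram_repetitions count_trigram_repetitions count_trigram_repetitions_alt
  exact core_eq (PySem.Str.lower sentence)
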